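-- pv_equiv track=rewrite | github.com/ark2016/VK-Technopark-project-2024 | data_mining/tests/functions/file_101_120.py | remove_duplicate_tuples
-- ===== SOURCE A (Python) =====
-- def remove_duplicate_tuples(lst):
--     seen = set()
--     result = []
--     for item in lst:
--         if item[0] not in seen:
--             seen.add(item[0])
--             result.append(item)
--     return result
-- ===== SOURCE B (Python) =====
-- def remove_duplicate_tuples(lst):
--     if not lst:
--         return []
--     head = lst[0]
--     return [head] + remove_duplicate_tuples([t for t in lst[1:] if t[0] != head[0]])
-- ===== Notes on version B (the rewrite author's own statement) =====
-- stated objective: alternative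
-- what changed: Replaces the seen-set accumulator loop by head-and-filter recursion: keep the head, delete all later tuples sharing its key, recurse on the shrunken rest; no auxiliary seen structure at all.
import Mathlib
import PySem

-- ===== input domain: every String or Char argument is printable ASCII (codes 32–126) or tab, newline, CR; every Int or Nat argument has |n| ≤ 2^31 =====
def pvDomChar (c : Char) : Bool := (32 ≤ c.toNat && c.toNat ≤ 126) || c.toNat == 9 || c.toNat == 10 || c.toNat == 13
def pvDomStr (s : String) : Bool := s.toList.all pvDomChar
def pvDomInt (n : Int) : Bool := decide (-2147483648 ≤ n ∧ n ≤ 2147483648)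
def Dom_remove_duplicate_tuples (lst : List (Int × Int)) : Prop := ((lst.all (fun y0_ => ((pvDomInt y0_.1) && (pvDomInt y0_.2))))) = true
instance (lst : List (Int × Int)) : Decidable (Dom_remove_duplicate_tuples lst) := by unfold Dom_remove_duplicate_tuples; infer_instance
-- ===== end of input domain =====

-- B replaces the seen-set loop by head-and-filter recursion (keep head, drop later tuples with
-- its key, recurse); alternative decomposition, no seen structure, O(n^2) worst case.

-- ===== PORT A =====
def remove_duplicate_tuples (lst : List (Int × Int)) : List (Int × Int) :=
  -- state = (seen : set, result : list), exactly A's loop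
  (lst.foldl
    (fun (st : PySem.Set Int × List (Int × Int)) item =>
      if !(PySem.Set.contains st.1 item.1) then
        (PySem.Set.add st.1 item.1, st.2 ++ [item])
      else st)
    (PySem.Set.empty, [])).2

-- ===== PORT B =====
def remove_duplicate_tuples_alt : List (Int × Int) → List (Int × Int)
  | [] => []
  | head :: rest =>
    head :: remove_duplicate_tuples_alt (rest.filter (fun t => t.1 ≠ head.1))
termination_by lst => lst.length
decreasing_by
  simp only [List.length_cons, List.length_unattach]
  exact Nat.lt_succ_of_le ((List.length_filter_le _ _).trans (List.length_attach).le)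

-- ===== PRECONDITION & SPEC =====
def Spec_remove_duplicate_tuples (lst : List (Int × Int)) (out : List (Int × Int)) : Prop := out = remove_duplicate_tuples_alt lst
instance (lst : List (Int × Int)) (out : List (Int × Int)) : Decidable (Spec_remove_duplicate_tuples lst out) := by unfold Spec_remove_duplicate_tuples; infer_instance

-- ===== CLAIM (what is proved, stated in full; the proofs are below) =====
def Claim_equal_remove_duplicate_tuples : Prop := ∀ (lst : List (Int × Int)), Dom_remove_duplicate_tuples lst → Spec_remove_duplicate_tuples lst (remove_duplicate_tuples lst)

-- ===== LEMMAS AND PROOFS =====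

-- Invariant: A's loop with seen-set s and accumulator r returns r followed by B's recursion
-- applied to the input with all already-seen keys filtered out.
theorem pv_loop_eq (lst : List (Int × Int)) :
    ∀ (s : PySem.Set Int) (r : List (Int × Int)),
      (lst.foldl
        (fun (st : PySem.Set Int × List (Int × Int)) item =>
          if !(PySem.Set.contains st.1 item.1) then
            (PySem.Set.add st.1 item.1, st.2 ++ [item])
          else st)
        (s, r)).2
      = r ++ remove_duplicate_tuples_alt (lst.filter (fun t => !(PySem.Set.contains s t.1))) := by
  induction lst with
  | nil => intro s r; simp [remove_duplicate_tuples_alt]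
  | cons a t ih =>
    intro s r
    rw [List.foldl_cons]
    by_cases hc : PySem.Set.contains s a.1 = true
    · simp only [hc, Bool.not_true, Bool.false_eq_true, if_false, List.filter_cons]
      exact ih s r
    · have hc' : PySem.Set.contains s a.1 = false := by
        cases h : PySem.Set.contains s a.1 <;> simp_all
      simp only [hc', Bool.not_false, if_true, List.filter_cons]
      rw [ih (PySem.Set.add s a.1) (r ++ [a])]
      have hfilter :
          t.filter (fun t' => !(PySem.Set.contains (PySem.Set.add s a.1) t'.1))
          = (t.filter (fun t' => !(PySem.Set.contains s t'.1))).filter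
              (fun t' => t'.1 ≠ a.1) := by
        rw [List.filter_filter]
        apply List.filter_congr
        intro x _
        have hnot : a.1 ∉ s := by
          intro hmem
          rw [(PySem.Set.contains_iff s a.1).mpr hmem] at hc'
          exact Bool.true_eq_false.mp hc'
        rw [PySem.Set.add_of_not_mem hnot]
        simp only [PySem.Set.contains_eq_listContains, List.contains_append,
          List.contains_cons, List.contains_nil]
        by_cases h : x.1 = a.1 <;> simp [h]
      rw [remove_duplicate_tuples_alt, ← hfilter]
      simp

-- ===== VERDICT (by name: the statement is the Claim_ definition above) =====
theorem remove_duplicate_tuples_spec : Claim_equal_remove_duplicate_tuples := by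
  intro lst _
  unfold Spec_remove_duplicate_tuples remove_duplicate_tuples
  rw [pv_loop_eq lst PySem.Set.empty []]
  have : lst.filter (fun t => !(PySem.Set.contains PySem.Set.empty t.1)) = lst := by
    apply List.filter_eq_self.mpr
    intro x _
    simp [PySem.Set.contains, PySem.Set.empty]
  rw [this, List.nil_append]
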